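-- pv_equiv track=rewrite | github.com/miliar/Code_Jam_Webscraper | solutions_python/Problem_142/772.py | analyseDiff
-- ===== SOURCE A (Python) =====
-- def analyseDiff(diffs):
-- 	if(len(diffs) == 1):
-- 		return len(diffs[0][0])
-- 	idlist = intersectListsDiffIds(diffs[0], diffs[1])
-- 	for diffList in diffs[2:]:
-- 		idlist = intersectListsPreviousIds(idlist, diffList)
-- 	if not idlist :
-- 		return -1
-- 	min = 1000
-- 	for idx in idlist:
-- 		if min > len(idx[1]):
-- 			min = len(idx[1])
-- 	return min
--
-- def intersectListsDiffIds( listx, listy):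
-- 	result = []
-- 	for idx, x in enumerate( listx):
-- 		for idy, y in enumerate(listy):
-- 			if idx != idy and y == x:
-- 				result += [([idx]+[idy], y)]
-- 	return result
--
-- def intersectListsPreviousIds( idList, list):
-- 	result = []
-- 	for idx in idList:
-- 		for idy, y in enumerate(list):
-- 			if idy not in idx[0] and y == idx[1]:
-- 				result += [(idx[0]+[idy], y)]
-- 	return result
-- ===== SOURCE B (Python) =====
-- def _can_assign(lists, v, used):
--     if not lists:
--         return True
--     for i, y in enumerate(lists[0]):
--         if i not in used and y == v:
--             if _can_assign(lists[1:], v, used | {i}):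
--                 return True
--     return False
--
-- def analyseDiff(diffs):
--     if len(diffs) == 1:
--         return len(diffs[0][0])
--     best = 1000
--     found = False
--     for v in dict.fromkeys(diffs[0]):
--         if _can_assign(diffs, v, set()):
--             found = True
--             if len(v) < best:
--                 best = len(v)
--     return best if found else -1
-- ===== Notes on version B (the rewrite author's own statement) =====
-- stated objective: faster
-- what changed: Instead of materialising the full cross-product list of all distinct-index tuples across the lists (which grows multiplicatively with each list), B iterates over the distinct values of the first list and runs a backtracking search for one set of distinct positions per value, exiting at the first success.
import Mathlib
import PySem

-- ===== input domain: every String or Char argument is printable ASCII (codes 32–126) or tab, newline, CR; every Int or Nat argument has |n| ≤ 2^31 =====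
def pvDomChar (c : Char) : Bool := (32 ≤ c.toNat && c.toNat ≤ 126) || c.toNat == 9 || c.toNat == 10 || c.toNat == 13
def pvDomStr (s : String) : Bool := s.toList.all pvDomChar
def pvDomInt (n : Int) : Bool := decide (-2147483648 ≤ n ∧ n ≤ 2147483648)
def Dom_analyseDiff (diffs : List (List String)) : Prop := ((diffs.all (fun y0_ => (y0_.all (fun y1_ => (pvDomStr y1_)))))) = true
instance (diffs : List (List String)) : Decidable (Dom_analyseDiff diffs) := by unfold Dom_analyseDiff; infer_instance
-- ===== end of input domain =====

-- B replaces A's exponential cross-product of index tuples by a per-distinct-value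
-- backtracking search for distinct positions with early exit (objective: faster in practice).

-- ===== PORT A =====
def intersectListsDiffIds (listx listy : List String) : List (List Int × String) :=
  (PySem.List.enumerate listx).foldl
    (fun result x =>
      (PySem.List.enumerate listy).foldl
        (fun result y =>
          if x.1 != y.1 && y.2 == x.2 then result ++ [([x.1] ++ [y.1], y.2)] else result)
        result)
    []

def intersectListsPreviousIds (idList : List (List Int × String)) (lst : List String) :
    List (List Int × String) :=
  idList.foldl
    (fun result idx =>
      (PySem.List.enumerate lst).foldl
        (fun result y =>
          if !(idx.1.contains y.1) && y.2 == idx.2 then result ++ [(idx.1 ++ [y.1], y.2)] else result)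
        result)
    []

def analyseDiff (diffs : List (List String)) : Int :=
  if diffs.length = 1 then
    match diffs with
    | (s :: _) :: _ => PySem.Str.len s
    | _ => 0   -- unreachable under Pre_ (Python raises IndexError)
  else
    match diffs with
    | l0 :: l1 :: rest =>
        let idlist := rest.foldl intersectListsPreviousIds (intersectListsDiffIds l0 l1)
        if idlist = [] then -1
        else idlist.foldl (fun m idx => if m > PySem.Str.len idx.2 then PySem.Str.len idx.2 else m) 1000
    | _ => 0   -- unreachable under Pre_ (Python raises IndexError)

-- ===== PORT B =====
def canAssign : List (List String) → String → PySem.Set Int → Bool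
  | [], _, _ => true
  | l :: rest, v, used =>
      (PySem.List.enumerate l).any
        (fun y => !(PySem.Set.contains used y.1) && y.2 == v && canAssign rest v (PySem.Set.add used y.1))

def analyseDiff_alt (diffs : List (List String)) : Int :=
  if diffs.length = 1 then
    PySem.Str.len ((diffs.headD []).headD "")   -- diffs[0][0]; default unreachable under Pre_ (Python raises IndexError)
  else
    let l0 := diffs.headD []   -- diffs[0]; default unreachable under Pre_ (Python raises IndexError on [])
    let r := (PySem.List.dedup l0).foldl
      (fun fb v =>
        if canAssign diffs v PySem.Set.empty then
          (true, if PySem.Str.len v < fb.2 then PySem.Str.len v else fb.2)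
        else fb)
      (false, (1000 : Int))
    if r.1 then r.2 else -1

-- ===== PRECONDITION & SPEC =====
-- Pre_ excludes exactly the inputs where Python A raises IndexError: the empty list
-- of lists, and a single list whose only member list is empty (diffs[0][0]).
def Pre_analyseDiff (diffs : List (List String)) : Prop :=
  diffs ≠ [] ∧ (diffs.length = 1 → diffs ≠ [[]])
instance (diffs : List (List String)) : Decidable (Pre_analyseDiff diffs) := by
  unfold Pre_analyseDiff; infer_instance

def pvWitness_analyseDiff : List (List String) := [["a", "bb"], ["bb", "a"]]

def Spec_analyseDiff (diffs : List (List String)) (out : Int) : Prop := out = analyseDiff_alt diffs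
instance (diffs : List (List String)) (out : Int) : Decidable (Spec_analyseDiff diffs out) := by
  unfold Spec_analyseDiff; infer_instance

-- ===== CLAIM (what is proved, stated in full; the proofs are below) =====
def Claim_equal_analyseDiff : Prop :=
  ∀ (diffs : List (List String)), Dom_analyseDiff diffs → Pre_analyseDiff diffs →
    Spec_analyseDiff diffs (analyseDiff diffs)

-- ===== LEMMAS AND PROOFS =====

def Hit (l : List String) (v : String) (i : Int) : Prop := (i, v) ∈ PySem.List.enumerate l 0
def ExtP (v : String) : List Int → List (List String) → List Int → Prop
  | _, [], js => js = []
  | ids, l :: rest, js => ∃ j js', js = j :: js' ∧ j ∉ ids ∧ Hit l v j ∧ ExtP v (ids ++ [j]) rest js'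

theorem mem_inter2 (lx ly : List String) (ids : List Int) (w : String) :
    (ids, w) ∈ intersectListsDiffIds lx ly ↔
      ∃ i j, ids = [i, j] ∧ i ≠ j ∧ Hit lx w i ∧ Hit ly w j := by
  unfold intersectListsDiffIds
  have hf : (fun (result : List (List Int × String)) (x : Int × String) =>
      (PySem.List.enumerate ly).foldl
        (fun result y =>
          if x.1 != y.1 && y.2 == x.2 then result ++ [([x.1] ++ [y.1], y.2)] else result)
        result) =
      (fun result x => result ++ ((PySem.List.enumerate ly).filter
          (fun y => x.1 != y.1 && y.2 == x.2)).map (fun y => ([x.1] ++ [y.1], y.2))) := by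
    funext result x; rw [PySem.List.foldl_append_if]
  rw [hf, PySem.List.foldl_append_eq_flatMap]
  simp only [List.nil_append, List.mem_flatMap, List.mem_map, List.mem_filter]
  constructor
  · rintro ⟨x, hx, y, ⟨hy, hc⟩, he⟩
    simp only [Bool.and_eq_true, bne_iff_ne, beq_iff_eq] at hc
    obtain ⟨hne, hveq⟩ := hc
    obtain ⟨h1, h2⟩ := Prod.mk.injEq .. ▸ he
    refine ⟨x.1, y.1, h1.symm, hne, ?_, ?_⟩
    · unfold Hit; rw [← h2, hveq]; exact hx
    · unfold Hit; rw [← h2]; exact hy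
  · rintro ⟨i, j, rfl, hne, hi, hj⟩
    exact ⟨(i, w), hi, (j, w), ⟨hj, by simp only [Bool.and_eq_true, bne_iff_ne, beq_iff_eq]; exact ⟨hne, trivial⟩⟩, rfl⟩

theorem mem_interPrev (idList : List (List Int × String)) (lst : List String)
    (ids' : List Int) (w : String) :
    (ids', w) ∈ intersectListsPreviousIds idList lst ↔
      ∃ e ∈ idList, ∃ j, ids' = e.1 ++ [j] ∧ w = e.2 ∧ j ∉ e.1 ∧ Hit lst e.2 j := by
  unfold intersectListsPreviousIds
  have hf : (fun (result : List (List Int × String)) (idx : List Int × String) =>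
      (PySem.List.enumerate lst).foldl
        (fun result y =>
          if !(idx.1.contains y.1) && y.2 == idx.2 then result ++ [(idx.1 ++ [y.1], y.2)] else result)
        result) =
      (fun result idx => result ++ ((PySem.List.enumerate lst).filter
          (fun y => !(idx.1.contains y.1) && y.2 == idx.2)).map (fun y => (idx.1 ++ [y.1], y.2))) := by
    funext result idx; rw [PySem.List.foldl_append_if]
  rw [hf, PySem.List.foldl_append_eq_flatMap]
  simp only [List.nil_append, List.mem_flatMap, List.mem_map, List.mem_filter]
  constructor
  · rintro ⟨e, he, y, ⟨hy, hc⟩, heq⟩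
    simp only [Bool.and_eq_true, Bool.not_eq_true', beq_iff_eq, List.contains_eq_mem,
      decide_eq_false_iff_not] at hc
    obtain ⟨hnm, hveq⟩ := hc
    obtain ⟨h1, h2⟩ := Prod.mk.injEq .. ▸ heq
    exact ⟨e, he, y.1, h1.symm, by rw [← h2, hveq], hnm, by unfold Hit; rw [← hveq]; simpa using hy⟩
  · rintro ⟨e, he, j, rfl, rfl, hnm, hj⟩
    exact ⟨e, he, (j, e.2), ⟨hj, by simp [hnm]⟩, rfl⟩

theorem mem_foldl_inter (rest : List (List String)) (init : List (List Int × String))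
    (p : List Int × String) :
    p ∈ rest.foldl intersectListsPreviousIds init ↔
      ∃ e ∈ init, ∃ js, p.1 = e.1 ++ js ∧ p.2 = e.2 ∧ ExtP e.2 e.1 rest js := by
  induction rest generalizing init with
  | nil =>
      simp only [List.foldl_nil, ExtP]
      constructor
      · intro hp; exact ⟨p, hp, [], by simp⟩
      · rintro ⟨e, he, js, h1, h2, rfl⟩
        have : p = e := Prod.ext (by simpa using h1) h2
        exact this ▸ he
  | cons l rest ih =>
      rw [List.foldl_cons, ih]
      constructor
      · rintro ⟨e', he', js, h1, h2, hext⟩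
        rw [show e' = (e'.1, e'.2) from rfl] at he'
        rw [mem_interPrev] at he'
        obtain ⟨e, he, j, hid, hw, hnm, hhit⟩ := he'
        refine ⟨e, he, j :: js, ?_, by rw [h2, hw], ?_⟩
        · rw [h1, hid, List.append_assoc]; rfl
        · exact ⟨j, js, rfl, hnm, hhit, by rw [← hid]; rw [hw] at hext; exact hext⟩
      · rintro ⟨e, he, js, h1, h2, hext⟩
        obtain ⟨j, js', rfl, hnm, hhit, hext'⟩ := hext
        refine ⟨(e.1 ++ [j], e.2), ?_, js', ?_, h2, hext'⟩
        · rw [mem_interPrev]; exact ⟨e, he, j, rfl, rfl, hnm, hhit⟩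
        · rw [h1, List.append_assoc]; rfl

theorem canAssign_iff (rest : List (List String)) (v : String) (used : PySem.Set Int)
    (ids : List Int) (h : ∀ i : Int, i ∈ used ↔ i ∈ ids) :
    canAssign rest v used = true ↔ ∃ js, ExtP v ids rest js := by
  induction rest generalizing used ids with
  | nil => simp [canAssign, ExtP]
  | cons l rest ih =>
      rw [canAssign, List.any_eq_true]
      constructor
      · rintro ⟨y, hy, hc⟩
        simp only [Bool.and_eq_true, Bool.not_eq_true', beq_iff_eq] at hc
        obtain ⟨⟨hnc, hveq⟩, hrec⟩ := hc
        have hnm : y.1 ∉ ids := by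
          intro hm
          rw [← h] at hm
          rw [(PySem.Set.contains_iff _ _).2 hm] at hnc; exact Bool.noConfusion hnc
        have hrec' := (ih (PySem.Set.add used y.1) (ids ++ [y.1]) (by
          intro i
          rw [PySem.Set.mem_add, List.mem_append, List.mem_singleton, h])).1 hrec
        obtain ⟨js', hext⟩ := hrec'
        exact ⟨y.1 :: js', y.1, js', rfl, hnm, by unfold Hit; rw [← hveq]; exact hy, hext⟩
      · rintro ⟨js, j, js', rfl, hnm, hhit, hext⟩
        refine ⟨(j, v), hhit, ?_⟩
        simp only [Bool.and_eq_true, Bool.not_eq_true', beq_iff_eq]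
        have hnu : j ∉ used := fun hm => hnm ((h j).1 hm)
        refine ⟨⟨?_, trivial⟩, ?_⟩
        · cases hcc : PySem.Set.contains used j with
          | false => rfl
          | true => exact absurd ((PySem.Set.contains_iff _ _).1 hcc) hnu
        · exact (ih (PySem.Set.add used j) (ids ++ [j]) (by
            intro i
            rw [PySem.Set.mem_add, List.mem_append, List.mem_singleton, h])).2 ⟨js', hext⟩

theorem key1 (l0 l1 : List String) (rest : List (List String)) (w : String) :
    (∃ ids, (ids, w) ∈ rest.foldl intersectListsPreviousIds (intersectListsDiffIds l0 l1)) ↔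
      canAssign (l0 :: l1 :: rest) w PySem.Set.empty = true := by
  rw [canAssign_iff _ _ _ ([] : List Int) (by simp [PySem.Set.empty])]
  constructor
  · rintro ⟨ids, hmem⟩
    rw [mem_foldl_inter] at hmem
    obtain ⟨e, he, js, h1, h2, hext⟩ := hmem
    rw [show e = (e.1, e.2) from rfl, mem_inter2] at he
    obtain ⟨i, j, hid, hne, hi, hj⟩ := he
    have h2' : w = e.2 := h2
    rw [← h2'] at hi hj hext
    rw [hid] at hext
    refine ⟨i :: j :: js, i, j :: js, rfl, by simp, hi, ?_⟩
    exact ⟨j, js, rfl, by simpa using (Ne.symm hne), hj, hext⟩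
  · rintro ⟨js, i, js1, rfl, _, hi, j, js2, rfl, hnm, hj, hext⟩
    refine ⟨[i, j] ++ js2, ?_⟩
    rw [mem_foldl_inter]
    refine ⟨([i, j], w), ?_, js2, rfl, rfl, hext⟩
    rw [mem_inter2]
    exact ⟨i, j, rfl, by simpa using fun h => hnm (by simp [h]), hi, hj⟩

theorem pair_split (cond : String → Bool) (vs : List String) (b : Bool) (m : Int) :
    vs.foldl
      (fun fb v => if cond v then (true, if PySem.Str.len v < fb.2 then PySem.Str.len v else fb.2) else fb)
      (b, m) =
    (b || vs.any cond,
     vs.foldl (fun m v => if cond v then (if PySem.Str.len v < m then PySem.Str.len v else m) else m) m) := by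
  induction vs generalizing b m with
  | nil => simp
  | cons v vs ih =>
      rw [List.foldl_cons, List.foldl_cons, List.any_cons]
      by_cases hc : cond v = true
      · rw [if_pos hc, if_pos hc, ih, hc]
        simp
      · rw [if_neg hc, if_neg hc, ih]
        have hf : cond v = false := by revert hc; cases cond v <;> simp
        rw [hf]
        simp

theorem hit_mem {l : List String} {v : String} {i : Int} (h : Hit l v i) : v ∈ l := by
  unfold Hit at h
  rw [PySem.List.mem_enumerate_iff] at h
  obtain ⟨k, hk, he⟩ := h
  simp at he
  exact he.2 ▸ List.getElem_mem hk

theorem foldl_min_le_init (l : List Int) (a : Int) : l.foldl min a ≤ a := by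
  induction l generalizing a with
  | nil => simp
  | cons x l ih => exact le_trans (ih (min a x)) (min_le_left a x)

theorem foldl_min_le_mem {l : List Int} {x : Int} (h : x ∈ l) (a : Int) : l.foldl min a ≤ x := by
  induction l generalizing a with
  | nil => simp at h
  | cons y l ih =>
      rcases List.mem_cons.1 h with rfl | h
      · exact le_trans (foldl_min_le_init l (min a x)) (min_le_right a x)
      · exact ih h (min a y)

theorem foldl_min_mem_cons (l : List Int) (a : Int) : l.foldl min a = a ∨ l.foldl min a ∈ l := by
  induction l generalizing a with
  | nil => simp
  | cons y l ih =>
      rcases ih (min a y) with h | h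
      · rcases min_cases a y with ⟨h2, _⟩ | ⟨h2, _⟩
        · exact Or.inl (by rw [List.foldl_cons, h, h2])
        · refine Or.inr ?_
          rw [List.foldl_cons, h, h2]
          exact List.mem_cons_self
      · refine Or.inr ?_
        rw [List.foldl_cons]
        exact List.mem_cons_of_mem _ h

theorem foldl_min_congr {l1 l2 : List Int} (h : ∀ x, x ∈ l1 ↔ x ∈ l2) (a : Int) :
    l1.foldl min a = l2.foldl min a := by
  apply le_antisymm
  · rcases foldl_min_mem_cons l2 a with h2 | h2
    · rw [h2]; exact foldl_min_le_init l1 a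
    · exact foldl_min_le_mem ((h _).2 h2) a
  · rcases foldl_min_mem_cons l1 a with h2 | h2
    · rw [h2]; exact foldl_min_le_init l2 a
    · exact foldl_min_le_mem ((h _).1 h2) a


-- ===== VERDICT (by name: the statement is the Claim_ definition above) =====
theorem analyseDiff_spec : Claim_equal_analyseDiff := by
  intro diffs _hdom hpre
  unfold Spec_analyseDiff
  match diffs with
  | [] => exact absurd rfl hpre.1
  | [l] =>
      match l with
      | [] => exact absurd rfl (hpre.2 rfl)
      | s :: t => rfl
  | l0 :: l1 :: rest =>
      have hlen : (l0 :: l1 :: rest).length ≠ 1 := by simp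
      rw [analyseDiff, analyseDiff_alt, if_neg hlen, if_neg hlen]
      show (if rest.foldl intersectListsPreviousIds (intersectListsDiffIds l0 l1) = [] then (-1 : Int)
            else (rest.foldl intersectListsPreviousIds (intersectListsDiffIds l0 l1)).foldl
              (fun m idx => if m > PySem.Str.len idx.2 then PySem.Str.len idx.2 else m) 1000) =
           (if ((PySem.List.dedup l0).foldl
                  (fun fb v => if canAssign (l0 :: l1 :: rest) v PySem.Set.empty then
                      (true, if PySem.Str.len v < fb.2 then PySem.Str.len v else fb.2)
                    else fb) (false, (1000 : Int))).1
            then ((PySem.List.dedup l0).foldl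
                  (fun fb v => if canAssign (l0 :: l1 :: rest) v PySem.Set.empty then
                      (true, if PySem.Str.len v < fb.2 then PySem.Str.len v else fb.2)
                    else fb) (false, (1000 : Int))).2
            else -1)
      set idlist := rest.foldl intersectListsPreviousIds (intersectListsDiffIds l0 l1) with hidl
      set cond : String → Bool := fun v => canAssign (l0 :: l1 :: rest) v PySem.Set.empty with hcond
      have hiff : ∀ v, (∃ ids, (ids, v) ∈ idlist) ↔ cond v = true := fun v => key1 l0 l1 rest v
      have hv_mem : ∀ p ∈ idlist, p.2 ∈ l0 := by
        intro p hp
        rw [hidl, mem_foldl_inter] at hp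
        obtain ⟨e, he, js, _, h2, _⟩ := hp
        rw [show e = (e.1, e.2) from rfl, mem_inter2] at he
        obtain ⟨i, j, _, _, hi, _⟩ := he
        rw [h2]
        exact hit_mem hi
      have hsets : ∀ x : Int, x ∈ idlist.map (fun p => PySem.Str.len p.2) ↔
          x ∈ ((PySem.List.dedup l0).filter cond).map PySem.Str.len := by
        intro x
        simp only [List.mem_map, List.mem_filter, PySem.List.mem_dedup _ _]
        constructor
        · rintro ⟨p, hp, rfl⟩
          exact ⟨p.2, ⟨hv_mem p hp, (hiff p.2).1 ⟨p.1, hp⟩⟩, rfl⟩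
        · rintro ⟨v, ⟨_, hcv⟩, rfl⟩
          obtain ⟨ids, hm⟩ := (hiff v).2 hcv
          exact ⟨(ids, v), hm, rfl⟩
      rw [pair_split]
      simp only [Bool.false_or]
      by_cases hA : idlist = []
      · have hany : ((PySem.List.dedup l0).any cond) = false := by
          cases hac : (PySem.List.dedup l0).any cond with
          | false => rfl
          | true =>
              rw [List.any_eq_true] at hac
              obtain ⟨v, _, hcv⟩ := hac
              obtain ⟨ids, hm⟩ := (hiff v).2 hcv
              rw [hA] at hm
              exact absurd hm (List.not_mem_nil)
        rw [if_pos hA, hany]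
        rfl
      · have hany : ((PySem.List.dedup l0).any cond) = true := by
          obtain ⟨p, hp⟩ := List.exists_mem_of_ne_nil idlist hA
          rw [List.any_eq_true]
          exact ⟨p.2, (PySem.List.mem_dedup _ _).2 (hv_mem p hp), (hiff p.2).1 ⟨p.1, hp⟩⟩
        rw [if_neg hA, hany, if_pos rfl]
        have hstepA : (fun (m : Int) (idx : List Int × String) =>
            if m > PySem.Str.len idx.2 then PySem.Str.len idx.2 else m) =
            fun m idx => min m (PySem.Str.len idx.2) := by
          funext m idx
          by_cases h : PySem.Str.len idx.2 < m
          · rw [if_pos h, min_eq_right h.le]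
          · rw [if_neg h, min_eq_left (not_lt.1 h)]
        have hstepB : (fun (m : Int) (v : String) =>
            if PySem.Str.len v < m then PySem.Str.len v else m) =
            fun m v => min m (PySem.Str.len v) := by
          funext m v
          by_cases h : PySem.Str.len v < m
          · rw [if_pos h, min_eq_right h.le]
          · rw [if_neg h, min_eq_left (not_lt.1 h)]
        calc idlist.foldl (fun m idx => if m > PySem.Str.len idx.2 then PySem.Str.len idx.2 else m) 1000
            = (idlist.map (fun p => PySem.Str.len p.2)).foldl min 1000 := by
              rw [hstepA, List.foldl_map]
          _ = (((PySem.List.dedup l0).filter cond).map PySem.Str.len).foldl min 1000 :=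
              foldl_min_congr hsets 1000
          _ = (PySem.List.dedup l0).foldl
                (fun m v => if cond v = true then (if PySem.Str.len v < m then PySem.Str.len v else m) else m) 1000 := by
              rw [PySem.List.foldl_if_eq_foldl_filter cond
                    (fun m v => if PySem.Str.len v < m then PySem.Str.len v else m),
                  hstepB]
              simp [List.foldl_map]
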